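-- pv_equiv track=rewrite | github.com/williamzujkowski/oscalize | tools/oscalize/testing/enhanced_corpus_tester.py | _analyze_test_categories
-- ===== SOURCE A (Python) =====
-- from typing import Any, Dict, List, Optional
--
-- def _analyze_test_categories(test_results: List[Dict[str, Any]]) -> Dict[str, Any]:
--     """Analyze test results by category"""
--     categories = {}
--
--     for result in test_results:
--         category = result.get("type", "unknown")
--         if category not in categories:
--             categories[category] = {"total": 0, "passed": 0, "failed": 0, "errors": 0}
--
--         categories[category]["total"] += 1
--
--         status = result.get("status", "UNKNOWN")
--         if status == "PASSED":
--             categories[category]["passed"] += 1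
--         elif status == "FAILED":
--             categories[category]["failed"] += 1
--         else:
--             categories[category]["errors"] += 1
--
--     return categories
-- ===== SOURCE B (Python) =====
-- # B: group-then-aggregate — distinct categories first, then per-category counts (alternative decomposition, not faster).
-- def _counts(rs):
--     total = len(rs)
--     passed = sum(1 for r in rs if r.get("status", "UNKNOWN") == "PASSED")
--     failed = sum(1 for r in rs if r.get("status", "UNKNOWN") == "FAILED")
--     return {"total": total, "passed": passed, "failed": failed,
--             "errors": total - passed - failed}
--
-- def _analyze_test_categories(test_results):
--     cats = list(dict.fromkeys(r.get("type", "unknown") for r in test_results))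
--     return {c: _counts([r for r in test_results
--                         if r.get("type", "unknown") == c])
--             for c in cats}
-- ===== Notes on version B (the rewrite author's own statement) =====
-- stated objective: alternative
-- what changed: Replaces the single-pass incremental bucketing into a mutated dict-of-dicts by a group-then-aggregate shape: the distinct categories are collected first, then each category's counts are computed by filtering and counting, with errors derived as total - passed - failed.
import Mathlib
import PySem

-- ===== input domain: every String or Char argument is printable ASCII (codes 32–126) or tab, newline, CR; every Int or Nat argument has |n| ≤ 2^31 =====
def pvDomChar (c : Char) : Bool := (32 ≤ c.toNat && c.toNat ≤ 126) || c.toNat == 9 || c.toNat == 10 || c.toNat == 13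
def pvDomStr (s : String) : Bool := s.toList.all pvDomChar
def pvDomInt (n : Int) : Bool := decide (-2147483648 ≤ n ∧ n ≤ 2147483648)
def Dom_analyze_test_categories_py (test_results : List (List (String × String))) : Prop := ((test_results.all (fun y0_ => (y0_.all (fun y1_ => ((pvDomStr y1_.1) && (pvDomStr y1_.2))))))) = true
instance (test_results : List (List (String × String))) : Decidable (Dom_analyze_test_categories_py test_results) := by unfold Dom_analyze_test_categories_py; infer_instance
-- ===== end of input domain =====

-- B replaces A's single-pass incremental bucketing into a mutated dict-of-dicts by a
-- group-then-aggregate decomposition (distinct categories first, then per-category counts,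
-- errors derived as total - passed - failed); equal return value, not claimed faster.

-- ===== PORT A =====
-- the loop body of A ('categories[category][field] += 1' is modelled by Dict.modify on the
-- outer dict; the key is always present there, so the unused default is Dict.empty)
def pvStepA (categories : PySem.Dict String (PySem.Dict String Int))
    (result : List (String × String)) : PySem.Dict String (PySem.Dict String Int) :=
  let category := (PySem.Dict.ofList result).getD "type" "unknown"
  let categories :=
    if categories.contains category then categories
    else categories.insert category
      (PySem.Dict.ofList [("total", 0), ("passed", 0), ("failed", 0), ("errors", 0)])
  let categories := categories.modify category PySem.Dict.empty
    (fun d => d.modify "total" 0 (· + 1))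
  let status := (PySem.Dict.ofList result).getD "status" "UNKNOWN"
  if status = "PASSED" then
    categories.modify category PySem.Dict.empty (fun d => d.modify "passed" 0 (· + 1))
  else if status = "FAILED" then
    categories.modify category PySem.Dict.empty (fun d => d.modify "failed" 0 (· + 1))
  else
    categories.modify category PySem.Dict.empty (fun d => d.modify "errors" 0 (· + 1))

def analyze_test_categories_py (test_results : List (List (String × String))) : List (String × List (String × Int)) :=
  let categories := test_results.foldl pvStepA PySem.Dict.empty
  categories.items.map (fun p => (p.1, p.2.items))

-- ===== PORT B =====
def pvCatOf (r : List (String × String)) : String :=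
  (PySem.Dict.ofList r).getD "type" "unknown"

def pvStatusOf (r : List (String × String)) : String :=
  (PySem.Dict.ofList r).getD "status" "UNKNOWN"

def pvCounts (rs : List (List (String × String))) : List (String × Int) :=
  let total : Int := rs.length
  let passed : Int := rs.countP (fun r => pvStatusOf r == "PASSED")
  let failed : Int := rs.countP (fun r => pvStatusOf r == "FAILED")
  [("total", total), ("passed", passed), ("failed", failed), ("errors", total - passed - failed)]

def analyze_test_categories_py_alt (test_results : List (List (String × String))) : List (String × List (String × Int)) :=
  let cats := PySem.List.dedup (test_results.map pvCatOf)
  cats.map (fun c => (c, pvCounts (test_results.filter (fun r => pvCatOf r == c))))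

-- ===== PRECONDITION & SPEC =====
def Spec_analyze_test_categories_py (test_results : List (List (String × String))) (out : List (String × List (String × Int))) : Prop := out = analyze_test_categories_py_alt test_results
instance (test_results : List (List (String × String))) (out : List (String × List (String × Int))) : Decidable (Spec_analyze_test_categories_py test_results out) := by unfold Spec_analyze_test_categories_py; infer_instance

-- ===== CLAIM (what is proved, stated in full; the proofs are below) =====
def Claim_equal_analyze_test_categories_py : Prop := ∀ (test_results : List (List (String × String))), Dom_analyze_test_categories_py test_results → Spec_analyze_test_categories_py test_results (analyze_test_categories_py test_results)

-- ===== LEMMAS AND PROOFS =====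

-- the per-result update of one category's inner counter dict
def pvUpdInner (result : List (String × String)) (inner : PySem.Dict String Int) : PySem.Dict String Int :=
  let inner := inner.modify "total" 0 (· + 1)
  if pvStatusOf result = "PASSED" then inner.modify "passed" 0 (· + 1)
  else if pvStatusOf result = "FAILED" then inner.modify "failed" 0 (· + 1)
  else inner.modify "errors" 0 (· + 1)

def pvInit0 : PySem.Dict String Int :=
  PySem.Dict.ofList [("total", 0), ("passed", 0), ("failed", 0), ("errors", 0)]

def pvMkQ (t p f e : Int) : PySem.Dict String Int :=
  ⟨[("total", t), ("passed", p), ("failed", f), ("errors", e)]⟩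

theorem pv_modify_modify {κ ν : Type} [BEq κ] [LawfulBEq κ]
    (d : PySem.Dict κ ν) (k : κ) (d0 : ν) (f g : ν → ν) :
    (d.modify k d0 f).modify k d0 g = d.modify k d0 (fun v => g (f v)) := by
  simp [PySem.Dict.modify, PySem.Dict.getD_insert_self, PySem.Dict.insert_insert_self]

theorem pvStepA_eq (acc : PySem.Dict String (PySem.Dict String Int)) (r : List (String × String)) :
    pvStepA acc r =
      (if acc.contains (pvCatOf r) then acc else acc.insert (pvCatOf r) pvInit0).modify
        (pvCatOf r) PySem.Dict.empty (pvUpdInner r) := by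
  unfold pvStepA pvUpdInner pvCatOf pvStatusOf pvInit0
  split_ifs <;> simp_all [pv_modify_modify]

theorem pv_fold_keys (trs : List (List (String × String))) :
    (trs.foldl pvStepA PySem.Dict.empty).keys = PySem.Set.ofList (trs.map pvCatOf) := by
  induction trs using List.reverseRecOn with
  | nil => simp [PySem.Set.ofList_eq_foldl]
  | append_singleton l r ih =>
    rw [List.foldl_append, List.foldl_cons, List.foldl_nil, pvStepA_eq, PySem.Dict.keys_modify,
        List.map_append, PySem.Set.ofList_eq_foldl, List.foldl_append, ← PySem.Set.ofList_eq_foldl,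
        List.map_cons, List.map_nil, List.foldl_cons, List.foldl_nil]
    by_cases h : (l.foldl pvStepA PySem.Dict.empty).contains (pvCatOf r)
    · have hc : pvCatOf r ∈ PySem.Set.ofList (l.map pvCatOf) := by
        rw [← ih]; exact (PySem.Dict.contains_iff_mem_keys _ _).1 h
      rw [if_pos h, PySem.Dict.keys_insert_of_contains _ _ h, ih]
      simp [PySem.Set.add, PySem.Set.contains, hc]
    · have hc : ¬ pvCatOf r ∈ PySem.Set.ofList (l.map pvCatOf) := by
        rw [← ih]; intro hm
        exact absurd ((PySem.Dict.contains_iff_mem_keys _ _).2 hm) (by simp [h])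
      rw [if_neg h,
          PySem.Dict.keys_insert_of_contains _ _ (PySem.Dict.contains_insert_self _ _ _),
          PySem.Dict.keys_insert_of_not_contains _ _ (by simp [h]), ih]
      simp [PySem.Set.add, PySem.Set.contains, hc]

theorem pv_fold_getD (trs : List (List (String × String))) :
    ∀ c, c ∈ trs.map pvCatOf →
      (trs.foldl pvStepA PySem.Dict.empty).getD c PySem.Dict.empty =
        (trs.filter (fun r => pvCatOf r == c)).foldl (fun i r => pvUpdInner r i) pvInit0 := by
  induction trs using List.reverseRecOn with
  | nil => intro c hc; simp at hc
  | append_singleton l r ih =>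
    intro c hc
    rw [List.foldl_append, List.foldl_cons, List.foldl_nil, pvStepA_eq,
        List.filter_append, List.foldl_append,
        PySem.Dict.getD_modify]
    by_cases hcc : c = pvCatOf r
    · rw [if_pos hcc, ← hcc]
      have hfil1 : List.filter (fun r' => pvCatOf r' == c) [r] = [r] := by
        simp [← hcc]
      rw [hfil1, List.foldl_cons, List.foldl_nil]
      by_cases h : (l.foldl pvStepA PySem.Dict.empty).contains c
      · have hmem : c ∈ l.map pvCatOf := by
          have := (PySem.Dict.contains_iff_mem_keys _ _).1 h
          rwa [pv_fold_keys, PySem.Set.mem_ofList] at this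
        rw [if_pos h, ih c hmem]
      · have hmem : ¬ c ∈ l.map pvCatOf := by
          intro hm
          exact absurd ((PySem.Dict.contains_iff_mem_keys _ _).2
            (by rw [pv_fold_keys, PySem.Set.mem_ofList]; exact hm)) (by simp [h])
        have hfil : l.filter (fun r' => pvCatOf r' == c) = [] := by
          rw [List.filter_eq_nil_iff]
          intro a ha hpa
          exact hmem (List.mem_map.2 ⟨a, ha, by simpa using hpa⟩)
        rw [if_neg h, PySem.Dict.getD_insert_self, hfil]
        rfl
    · have hmem : c ∈ l.map pvCatOf := by
        simp only [List.map_append, List.map_cons, List.map_nil, List.mem_append,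
          List.mem_singleton] at hc
        rcases hc with h1 | h1
        · exact h1
        · exact absurd h1 hcc
      have hfil : List.filter (fun r' => pvCatOf r' == c) [r] = [] := by
        simp [Ne.symm hcc]
      rw [if_neg hcc, hfil, List.foldl_nil]
      by_cases h : (l.foldl pvStepA PySem.Dict.empty).contains (pvCatOf r)
      · rw [if_pos h, ih c hmem]
      · rw [if_neg h, PySem.Dict.getD_insert_of_ne _ _ _ hcc, ih c hmem]

theorem pv_updInner_mkQ (r : List (String × String)) (t p f e : Int) :
    pvUpdInner r (pvMkQ t p f e) =
      if pvStatusOf r = "PASSED" then pvMkQ (t + 1) (p + 1) f e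
      else if pvStatusOf r = "FAILED" then pvMkQ (t + 1) p (f + 1) e
      else pvMkQ (t + 1) p f (e + 1) := by
  unfold pvUpdInner pvMkQ
  split_ifs <;> rfl

theorem pv_countP_partition (rs : List (List (String × String))) :
    rs.countP (fun r => pvStatusOf r == "PASSED") + rs.countP (fun r => pvStatusOf r == "FAILED")
      + rs.countP (fun r => !(pvStatusOf r == "PASSED") && !(pvStatusOf r == "FAILED")) = rs.length := by
  induction rs with
  | nil => rfl
  | cons a l ih =>
    simp only [List.countP_cons, List.length_cons]
    by_cases h1 : pvStatusOf a = "PASSED" <;> by_cases h2 : pvStatusOf a = "FAILED" <;>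
      simp [h1, h2] <;> omega

theorem pv_fold_updInner (rs : List (List (String × String))) :
    ∀ t p f e, rs.foldl (fun i r => pvUpdInner r i) (pvMkQ t p f e) =
      pvMkQ (t + rs.length) (p + rs.countP (fun r => pvStatusOf r == "PASSED"))
        (f + rs.countP (fun r => pvStatusOf r == "FAILED"))
        (e + rs.countP (fun r => !(pvStatusOf r == "PASSED") && !(pvStatusOf r == "FAILED"))) := by
  induction rs with
  | nil => intro t p f e; simp
  | cons a l ih =>
    intro t p f e
    rw [List.foldl_cons, pv_updInner_mkQ]
    by_cases h1 : pvStatusOf a = "PASSED"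
    · rw [if_pos h1, ih]
      simp [pvMkQ, h1]
      constructor <;> ring
    · rw [if_neg h1]
      by_cases h2 : pvStatusOf a = "FAILED"
      · rw [if_pos h2, ih]
        simp [pvMkQ, h2]
        constructor <;> ring
      · rw [if_neg h2, ih]
        simp [pvMkQ, h1, h2]
        constructor <;> ring

theorem pv_init0_eq : pvInit0 = pvMkQ 0 0 0 0 := by decide

-- ===== VERDICT (by name: the statement is the Claim_ definition above) =====
theorem analyze_test_categories_py_spec : Claim_equal_analyze_test_categories_py := by
  intro trs _
  unfold Spec_analyze_test_categories_py analyze_test_categories_py analyze_test_categories_py_alt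
  simp only [PySem.List.dedup]
  have hnd : (trs.foldl pvStepA PySem.Dict.empty).keys.Nodup := by
    rw [pv_fold_keys]; exact PySem.Set.nodup_ofList _
  rw [PySem.Dict.items_eq_map_keys _ hnd PySem.Dict.empty, List.map_map, pv_fold_keys]
  apply List.map_congr_left
  intro c hcmem
  have hc : c ∈ trs.map pvCatOf := (PySem.Set.mem_ofList _ _).1 hcmem
  simp only [Function.comp]
  rw [pv_fold_getD trs c hc, pv_init0_eq, pv_fold_updInner]
  simp only [zero_add]
  have hpart := pv_countP_partition (trs.filter (fun r => pvCatOf r == c))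
  congr 1
  simp only [pvMkQ, pvCounts, List.cons.injEq, Prod.mk.injEq, and_true, true_and]
  omega
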